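-- pv_equiv track=rewrite | github.com/marvin-k3/ying | app/recognizers/acoustid_recognizer.py | _select_best_release
-- ===== SOURCE A (Python) =====
-- from typing import Any, Dict, List, Optional
--
-- def _select_best_release(releases: List[Dict[str, Any]]) -> Dict[str, Any]:
--     """Select the best release from multiple options.
--
--     Args:
--         releases: List of release dictionaries.
--
--     Returns:
--         Best release dictionary.
--     """
--     if not releases:
--         return {}
--
--     # Prefer releases with dates
--     dated_releases = [r for r in releases if r.get("date")]
--     if dated_releases:
--         releases = dated_releases
--
--     # Prefer releases from major markets (US, GB, etc.)
--     major_countries = {"US", "GB", "DE", "FR", "JP"}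
--     major_releases = [r for r in releases if r.get("country") in major_countries]
--     if major_releases:
--         releases = major_releases
--
--     # Return first remaining release
--     return releases[0]
-- ===== SOURCE B (Python) =====
-- from typing import Any, Dict, List
--
--
-- def _select_best_release(releases: List[Dict[str, Any]]) -> Dict[str, Any]:
--     """Select the best release: single scoring pass instead of two filter passes.
--
--     Score = 2*(has a truthy date) + (country is a major market); max() returns
--     the first release achieving the maximal score, which reproduces the
--     original 'first remaining' tie-break.
--     """
--     if not releases:
--         return {}
--     major_countries = {"US", "GB", "DE", "FR", "JP"}
--     return max(
--         releases,
--         key=lambda r: 2 * bool(r.get("date")) + (r.get("country") in major_countries),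
--     )
-- ===== Notes on version B (the rewrite author's own statement) =====
-- stated objective: simpler
-- what changed: Replaces the two sequential filter passes (dated, then major-market) and their non-emptiness fallbacks with a single max() pass using the lexicographic score 2*has_date + is_major, relying on max returning the first maximal element.
import Mathlib
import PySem

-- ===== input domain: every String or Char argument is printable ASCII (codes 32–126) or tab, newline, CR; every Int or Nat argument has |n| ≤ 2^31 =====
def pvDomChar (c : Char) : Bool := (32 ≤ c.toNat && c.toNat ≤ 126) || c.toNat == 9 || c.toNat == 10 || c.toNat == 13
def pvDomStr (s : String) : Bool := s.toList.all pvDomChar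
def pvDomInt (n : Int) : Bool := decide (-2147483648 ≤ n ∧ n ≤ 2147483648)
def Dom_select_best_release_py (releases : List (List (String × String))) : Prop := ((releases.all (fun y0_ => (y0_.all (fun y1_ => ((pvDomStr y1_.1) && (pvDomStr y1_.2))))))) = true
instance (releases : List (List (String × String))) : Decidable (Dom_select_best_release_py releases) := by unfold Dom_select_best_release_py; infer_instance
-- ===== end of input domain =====

-- B replaces A's two sequential filter passes with a single max() pass over a
-- lexicographic score (simpler decomposition; same O(n) cost).


-- ===== PORT A =====
-- r.get("date") is truthy iff the key is present with a non-empty string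
def pvHasDate (r : List (String × String)) : Bool :=
  match (PySem.Dict.mk r).get? "date" with
  | some s => !(s == "")
  | none => false

-- r.get("country") in {"US","GB","DE","FR","JP"} (a missing key is never a member)
def pvIsMajor (r : List (String × String)) : Bool :=
  match (PySem.Dict.mk r).get? "country" with
  | some c => ["US", "GB", "DE", "FR", "JP"].contains c
  | none => false

def select_best_release_py (releases : List (List (String × String))) : List (String × String) :=
  if releases.isEmpty then []
  else
    let dated_releases := releases.filter (fun r => pvHasDate r)
    let releases1 := if !dated_releases.isEmpty then dated_releases else releases
    let major_releases := releases1.filter (fun r => pvIsMajor r)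
    let releases2 := if !major_releases.isEmpty then major_releases else releases1
    releases2.headD []  -- releases[0]; the list is non-empty here

-- ===== PORT B =====
-- key = 2*bool(r.get("date")) + (r.get("country") in major_countries)
def pvKey (r : List (String × String)) : Int :=
  2 * (if pvHasDate r then 1 else 0) + (if pvIsMajor r then 1 else 0)

def select_best_release_py_alt (releases : List (List (String × String))) : List (String × String) :=
  if releases.isEmpty then []
  else (PySem.List.max? releases pvKey).getD []  -- max() on a non-empty list

-- ===== PRECONDITION & SPEC =====
def Spec_select_best_release_py (releases : List (List (String × String))) (out : List (String × String)) : Prop := out = select_best_release_py_alt releases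
instance (releases : List (List (String × String))) (out : List (String × String)) : Decidable (Spec_select_best_release_py releases out) := by unfold Spec_select_best_release_py; infer_instance

-- ===== CLAIM (what is proved, stated in full; the proofs are below) =====
def Claim_equal_select_best_release_py : Prop := ∀ (releases : List (List (String × String))), Dom_select_best_release_py releases → Spec_select_best_release_py releases (select_best_release_py releases)

-- ===== LEMMAS AND PROOFS =====

-- the foldl inside PySem.List.max?, starting from `some a`, returns the FIRST
-- element of key M (the maximum), provided one exists
theorem pvFoldFirstMax {α : Type} (key : α → Int) (M : Int) :
    ∀ (t : List α) (a : α), key a ≤ M → (∀ y ∈ t, key y ≤ M) →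
    (key a = M ∨ ∃ y ∈ t, key y = M) →
    t.foldl (fun acc x => match acc with
      | none => some x
      | some m => if key m < key x then some x else some m) (some a)
      = if key a = M then some a else (t.filter (fun x => decide (key x = M))).head? := by
  intro t
  induction t with
  | nil =>
    intro a ha _ hex
    have hM : key a = M := by
      rcases hex with h | ⟨y, hy, _⟩
      · exact h
      · simp at hy
    simp [hM]
  | cons x t ih =>
    intro a ha hall hex
    simp only [List.foldl_cons]
    by_cases hx : key a < key x
    · have hane : key a ≠ M := by
        have := hall x (by simp)
        omega
      have hex' : key x = M ∨ ∃ y ∈ t, key y = M := by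
        rcases hex with h | ⟨y, hy, hyM⟩
        · exact absurd h hane
        · rcases List.mem_cons.mp hy with rfl | hyt
          · exact Or.inl hyM
          · exact Or.inr ⟨y, hyt, hyM⟩
      rw [show (if key a < key x then some x else some a) = some x from if_pos hx]
      rw [ih x (hall x (by simp)) (fun y hy => hall y (by simp [hy])) hex']
      simp only [if_neg hane, List.filter_cons]
      by_cases hxM : key x = M
      · simp [hxM]
      · simp [hxM]
    · have hxa : key x ≤ key a := le_of_not_gt hx
      have hex' : key a = M ∨ ∃ y ∈ t, key y = M := by
        rcases hex with h | ⟨y, hy, hyM⟩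
        · exact Or.inl h
        · rcases List.mem_cons.mp hy with rfl | hyt
          · exact Or.inl (le_antisymm ha (hyM ▸ hxa))
          · exact Or.inr ⟨y, hyt, hyM⟩
      rw [show (if key a < key x then some x else some a) = some a from if_neg hx]
      rw [ih a ha (fun y hy => hall y (by simp [hy])) hex']
      by_cases haM : key a = M
      · simp [haM]
      · have hxM : key x ≠ M := fun h => haM (le_antisymm ha (h ▸ hxa))
        simp [haM, hxM]

-- max? on a non-empty list is the first element achieving the maximum key M
theorem pvMaxFirst {α : Type} (key : α → Int) (M : Int) (h : α) (t : List α)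
    (hall : ∀ y ∈ h :: t, key y ≤ M) (hex : ∃ y ∈ h :: t, key y = M) :
    PySem.List.max? (h :: t) key = ((h :: t).filter (fun x => decide (key x = M))).head? := by
  have hh : key h ≤ M := hall h (by simp)
  have hex' : key h = M ∨ ∃ y ∈ t, key y = M := by
    rcases hex with ⟨y, hy, hyM⟩
    rcases List.mem_cons.mp hy with rfl | hyt
    · exact Or.inl hyM
    · exact Or.inr ⟨y, hyt, hyM⟩
  have := pvFoldFirstMax key M t h hh (fun y hy => hall y (by simp [hy])) hex'
  have e : PySem.List.max? (h :: t) key = t.foldl (fun acc x => match acc with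
      | none => some x
      | some m => if key m < key x then some x else some m) (some h) := rfl
  rw [e, this]
  by_cases hM : key h = M
  · simp [hM]
  · simp [hM]

-- key values: pvKey r = 3 ↔ dated ∧ major, etc.
theorem pvKey_le3 (r : List (String × String)) : pvKey r ≤ 3 := by
  unfold pvKey; cases pvHasDate r <;> cases pvIsMajor r <;> simp

theorem pvKey_d3 (r : List (String × String)) :
    (decide (pvKey r = 3)) = (pvHasDate r && pvIsMajor r) := by
  cases hd : pvHasDate r <;> cases hc : pvIsMajor r <;> simp [pvKey, hd, hc]

theorem pvKey_d2 (r : List (String × String)) (h : (pvHasDate r && pvIsMajor r) = false) :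
    (decide (pvKey r = 2)) = pvHasDate r := by
  cases hd : pvHasDate r <;> cases hc : pvIsMajor r <;> simp [pvKey, hd, hc] <;> simp [hd, hc] at h

theorem pvKey_d1 (r : List (String × String)) (h : pvHasDate r = false) :
    (decide (pvKey r = 1)) = pvIsMajor r := by
  cases hc : pvIsMajor r <;> simp [pvKey, h, hc]

theorem pvKey_d0 (r : List (String × String)) (hd : pvHasDate r = false)
    (hc : pvIsMajor r = false) : (decide (pvKey r = 0)) = true := by
  simp [pvKey, hd, hc]

theorem select_best_release_py_spec : Claim_equal_select_best_release_py := by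
  intro releases _
  unfold Spec_select_best_release_py
  match releases with
  | [] => rfl
  | h :: t =>
    simp only [select_best_release_py, select_best_release_py_alt, List.isEmpty_cons,
      Bool.false_eq_true, if_false]
    by_cases h3 : ∃ r ∈ h :: t, (pvHasDate r && pvIsMajor r) = true
    · -- some release is dated AND from a major market: M = 3
      rw [pvMaxFirst pvKey 3 h t (fun y _ => pvKey_le3 y)
        (by
          obtain ⟨r, hr, hrp⟩ := h3
          exact ⟨r, hr, by have := pvKey_d3 r; simp [hrp] at this; exact this⟩)]
      obtain ⟨r, hr, hrp⟩ := h3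
      have hd : ((h :: t).filter (fun r => pvHasDate r)).isEmpty = false := by
        simp only [List.isEmpty_eq_false_iff, ne_eq, List.filter_eq_nil_iff]
        push_neg
        exact ⟨r, hr, by simp_all⟩
      rw [hd]
      simp only [Bool.not_false, if_true]
      have hm : ((List.filter (fun r => pvHasDate r) (h :: t)).filter
          (fun r => pvIsMajor r)).isEmpty = false := by
        simp only [List.isEmpty_eq_false_iff, ne_eq, List.filter_eq_nil_iff]
        push_neg
        exact ⟨r, by simp_all, by simp_all⟩
      rw [hm]
      simp only [Bool.not_false, if_true]
      rw [List.filter_filter]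
      rw [List.filter_congr (l := h :: t)
        (fun x _ => show (pvIsMajor x && pvHasDate x) = (decide (pvKey x = 3)) by
          rw [pvKey_d3, Bool.and_comm])]
      simp [List.headD_eq_head?]
    · by_cases h2 : ∃ r ∈ h :: t, pvHasDate r = true
      · -- some dated release, none of them major: M = 2
        push_neg at h3
        have hno3 : ∀ y ∈ h :: t, (pvHasDate y && pvIsMajor y) = false := by
          intro y hy
          have := h3 y hy
          simpa using this
        rw [pvMaxFirst pvKey 2 h t
          (fun y hy => by
            have := hno3 y hy
            cases hd : pvHasDate y <;> cases hc : pvIsMajor y <;>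
              simp [pvKey, hd, hc] <;> simp [hd, hc] at this)
          (by
            obtain ⟨r, hr, hrp⟩ := h2
            refine ⟨r, hr, ?_⟩
            have := pvKey_d2 r (hno3 r hr)
            simp [hrp] at this
            exact this)]
        obtain ⟨r, hr, hrp⟩ := h2
        have hd : ((h :: t).filter (fun r => pvHasDate r)).isEmpty = false := by
          simp only [List.isEmpty_eq_false_iff, ne_eq, List.filter_eq_nil_iff]
          push_neg
          exact ⟨r, hr, by simp [hrp]⟩
        rw [hd]
        simp only [Bool.not_false, if_true]
        have hm : ((List.filter (fun r => pvHasDate r) (h :: t)).filter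
            (fun r => pvIsMajor r)).isEmpty = true := by
          simp only [List.isEmpty_iff, List.filter_filter, List.filter_eq_nil_iff]
          intro y hy
          have := hno3 y hy
          cases hdy : pvHasDate y <;> cases hcy : pvIsMajor y <;> simp_all
        rw [hm]
        simp only [Bool.not_true, Bool.false_eq_true, if_false]
        rw [List.filter_congr (l := h :: t)
          (fun x hx => show pvHasDate x = (decide (pvKey x = 2)) from
            (pvKey_d2 x (hno3 x hx)).symm)]
        simp [List.headD_eq_head?]
      · -- no dated release at all
        push_neg at h2
        have hnod : ∀ y ∈ h :: t, pvHasDate y = false := by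
          intro y hy
          have := h2 y hy
          simpa using this
        have hd : ((h :: t).filter (fun r => pvHasDate r)).isEmpty = true := by
          simp only [List.isEmpty_iff, List.filter_eq_nil_iff]
          intro y hy
          simp [hnod y hy]
        rw [hd]
        simp only [Bool.not_true, Bool.false_eq_true, if_false]
        by_cases h1 : ∃ r ∈ h :: t, pvIsMajor r = true
        · -- some major-market release: M = 1
          rw [pvMaxFirst pvKey 1 h t
            (fun y hy => by
              cases hc : pvIsMajor y <;> simp [pvKey, hnod y hy, hc])
            (by
              obtain ⟨r, hr, hrp⟩ := h1
              refine ⟨r, hr, ?_⟩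
              have := pvKey_d1 r (hnod r hr)
              simp [hrp] at this
              exact this)]
          obtain ⟨r, hr, hrp⟩ := h1
          have hm : ((h :: t).filter (fun r => pvIsMajor r)).isEmpty = false := by
            simp only [List.isEmpty_eq_false_iff, ne_eq, List.filter_eq_nil_iff]
            push_neg
            exact ⟨r, hr, by simp [hrp]⟩
          rw [hm]
          simp only [Bool.not_false, if_true]
          rw [List.filter_congr (l := h :: t)
            (fun x hx => show pvIsMajor x = (decide (pvKey x = 1)) from
              (pvKey_d1 x (hnod x hx)).symm)]
          simp [List.headD_eq_head?]
        · -- neither filter matches anything: M = 0, first element wins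
          push_neg at h1
          have hnom : ∀ y ∈ h :: t, pvIsMajor y = false := by
            intro y hy
            have := h1 y hy
            simpa using this
          rw [pvMaxFirst pvKey 0 h t
            (fun y hy => by simp [pvKey, hnod y hy, hnom y hy])
            ⟨h, by simp, by simp [pvKey, hnod h (by simp), hnom h (by simp)]⟩]
          have hm : ((h :: t).filter (fun r => pvIsMajor r)).isEmpty = true := by
            simp only [List.isEmpty_iff, List.filter_eq_nil_iff]
            intro y hy
            simp [hnom y hy]
          rw [hm]
          simp only [Bool.not_true, Bool.false_eq_true, if_false]
          rw [List.filter_eq_self.mpr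
            (fun x hx => pvKey_d0 x (hnod x hx) (hnom x hx))]
          simp [List.headD_eq_head?]
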